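-- pv_equiv track=rewrite | github.com/MLBN/mlt2 | mlt2/fixed.py | parse_decimal
-- ===== SOURCE A (Python) =====
-- def parse_decimal(s):
--     ''' parses numbers of the form xx,xxx,xxx.xx (US)
--     resp xx.xxx.xxx,xx (german)
--     returns decimalpoint version with thousand separators removed.
--     If number cannot be determined, string is returned unaltered
--     '''
--     s=s.strip()
--     if s=='': return '0.00'
--     assert len(s)>0
--     separator=None
--
--     try:
--         assert s[0] in '+-0123456789'
--         for dig in s[1:]:
--             assert dig in '0123456789,.'
--     except AssertionError:
--         return s# ignore string which cannot be handled
--     i = len(s)-1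
--     while i>=0:
--         if s[i] in ',.':
--             separator = s[i]
--             break
--         i -= 1
--     if separator is not None:
--         if s.count(separator)>=2:
--             s=s.replace( separator, '')
--             separator = '!'
--
--         s = s.replace( separator, '!')
--         s = s.replace(',','')
--         s = s.replace('.','')
--         s = s.replace('!','.')
--     #if separator is None or separator=='!':
--     #    s+='.00'
--     if s[0]=='+': s=s[1:]
--     return s
-- ===== SOURCE B (Python) =====
-- def parse_decimal(s):
--     s = s.strip()
--     if s == '':
--         return '0.00'
--     if s[0] not in '+-0123456789':
--         return s
--     for c in s[1:]:
--         if c not in '0123456789,.':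
--             return s
--     # one forward pass: split into the part before the last separator (separators
--     # dropped), the part after it, the last separator seen, and per-separator counts
--     whole, frac, last, n_comma, n_dot = [], [], None, 0, 0
--     for c in s:
--         if c == ',' or c == '.':
--             whole.extend(frac)
--             frac = []
--             last = c
--             if c == ',':
--                 n_comma += 1
--             else:
--                 n_dot += 1
--         else:
--             frac.append(c)
--     if last is not None and (n_comma if last == ',' else n_dot) == 1:
--         out = ''.join(whole) + '.' + ''.join(frac)
--     else:
--         out = ''.join(whole) + ''.join(frac)
--     return out[1:] if out[0] == '+' else out
-- ===== Notes on version B (the rewrite author's own statement) =====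
-- stated objective: alternative
-- what changed: A scans backwards for the last separator and then normalises the string with a five-pass sentinel replace chain; B makes a single forward pass that accumulates the digits before/after the last separator and the per-separator counts, then assembles the result directly.
import Mathlib
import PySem

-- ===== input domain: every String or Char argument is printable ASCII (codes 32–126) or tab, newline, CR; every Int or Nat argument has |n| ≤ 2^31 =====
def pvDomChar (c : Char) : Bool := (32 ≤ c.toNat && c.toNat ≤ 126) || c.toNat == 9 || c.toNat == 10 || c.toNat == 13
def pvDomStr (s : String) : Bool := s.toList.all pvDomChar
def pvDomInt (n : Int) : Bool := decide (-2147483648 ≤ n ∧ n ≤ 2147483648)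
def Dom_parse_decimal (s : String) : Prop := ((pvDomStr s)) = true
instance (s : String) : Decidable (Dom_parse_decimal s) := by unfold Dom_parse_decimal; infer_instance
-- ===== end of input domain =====

-- B replaces A's backward separator scan plus its five-pass sentinel replace chain by a single
-- forward fold that accumulates the digits before/after the last separator and the separator counts
-- (objective: alternative decomposition, same O(n) cost; equivalence proved for all strings).

-- ===== PORT A =====
-- single-char 'c in "…"' is ported as list membership (exact for one-character needles);
-- the backward while loop searching the last separator is ported as find? on the reversed list;
-- s[0] is read with headD on the provably non-empty list.
def parse_decimal (s : String) : String :=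
  let t := PySem.Chars.strip s.toList
  if t = [] then "0.00"
  else if "+-0123456789".toList.contains (t.headD ' ') &&
          (t.drop 1).all (fun d => "0123456789,.".toList.contains d) then
    let sep? := t.reverse.find? (fun ch => ",.".toList.contains ch)
    let u :=
      if sep? = none then t
      else
        let sep0 := sep?.getD '!'
        let p : List Char × Char :=
          if 2 ≤ PySem.Chars.count t [sep0]
          then (PySem.Chars.replace t [sep0] [], '!') else (t, sep0)
        PySem.Chars.replace (PySem.Chars.replace (PySem.Chars.replace
          (PySem.Chars.replace p.1 [p.2] ['!']) [','] []) ['.'] []) ['!'] ['.']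
    String.ofList (if u.headD ' ' = '+' then u.drop 1 else u)
  else String.ofList t

-- ===== PORT B =====
-- state: (whole, frac, last separator seen, number of ',', number of '.')
def pvStepB (acc : List Char × List Char × Option Char × Int × Int) (ch : Char) :
    List Char × List Char × Option Char × Int × Int :=
  if ch = ',' ∨ ch = '.' then
    (acc.1 ++ acc.2.1, [], some ch,
     acc.2.2.2.1 + (if ch = ',' then 1 else 0),
     acc.2.2.2.2 + (if ch = ',' then 0 else 1))
  else
    (acc.1, acc.2.1 ++ [ch], acc.2.2.1, acc.2.2.2.1, acc.2.2.2.2)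

def parse_decimal_alt (s : String) : String :=
  let t := PySem.Chars.strip s.toList
  if t = [] then "0.00"
  else if "+-0123456789".toList.contains (t.headD ' ') &&
          (t.drop 1).all (fun d => "0123456789,.".toList.contains d) then
    let st := t.foldl pvStepB ([], [], none, 0, 0)
    let out :=
      if st.2.2.1 ≠ none ∧ (if st.2.2.1.getD ' ' = ',' then st.2.2.2.1 else st.2.2.2.2) = 1
      then st.1 ++ '.' :: st.2.1 else st.1 ++ st.2.1
    String.ofList (if out.headD ' ' = '+' then out.drop 1 else out)
  else String.ofList t

-- ===== PRECONDITION & SPEC =====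
def Spec_parse_decimal (s : String) (out : String) : Prop := out = parse_decimal_alt s
instance (s : String) (out : String) : Decidable (Spec_parse_decimal s out) := by unfold Spec_parse_decimal; infer_instance

-- ===== CLAIM (what is proved, stated in full; the proofs are below) =====
def Claim_equal_parse_decimal : Prop := ∀ (s : String), Dom_parse_decimal s → Spec_parse_decimal s (parse_decimal s)

-- ===== LEMMAS AND PROOFS =====

theorem rep_go_single (a : Char) (new : List Char) :
    ∀ (fuel : Nat) (l acc : List Char), l.length ≤ fuel →
      PySem.Chars.replace.go [a] new fuel l acc
        = acc.reverse ++ l.flatMap (fun c => if c = a then new else [c]) := by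
  intro fuel
  induction fuel with
  | zero => intro l acc h; rw [Nat.le_zero] at h; rw [List.length_eq_zero_iff] at h; subst h
            simp [PySem.Chars.replace.go]
  | succ n ih =>
      intro l acc h
      cases l with
      | nil => simp [PySem.Chars.replace.go]
      | cons c t =>
          simp only [PySem.Chars.replace.go]
          by_cases hc : c = a
          · subst hc
            have hp : [c].isPrefixOf (c :: t) = true := by simp [List.isPrefixOf]
            simp only [hp, if_pos, List.length_cons, List.length_nil, List.drop_succ_cons,
              List.drop_zero]
            rw [ih t _ (by simpa using h)]
            simp
          · have hp : [a].isPrefixOf (c :: t) = false := by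
              simp [List.isPrefixOf]; intro h'; exact absurd h'.symm hc
            simp only [hp]
            rw [if_neg (by simp)]
            rw [ih t _ (by simpa using h)]
            simp [hc]

theorem count_go_single (a : Char) :
    ∀ (fuel : Nat) (l : List Char) (acc : Nat), l.length ≤ fuel →
      PySem.Chars.count.go [a] fuel l acc = acc + l.count a := by
  intro fuel
  induction fuel with
  | zero => intro l acc h; rw [Nat.le_zero] at h; rw [List.length_eq_zero_iff] at h; subst h
            simp [PySem.Chars.count.go]
  | succ n ih =>
      intro l acc h
      cases l with
      | nil => simp [PySem.Chars.count.go]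
      | cons c t =>
          simp only [PySem.Chars.count.go]
          by_cases hc : c = a
          · subst hc
            have hp : [c].isPrefixOf (c :: t) = true := by simp [List.isPrefixOf]
            simp only [hp, if_pos, List.length_cons, List.length_nil, List.drop_succ_cons,
              List.drop_zero]
            rw [ih t _ (by simpa using h)]
            simp [List.count_cons]
            omega
          · have hp : [a].isPrefixOf (c :: t) = false := by
              simp [List.isPrefixOf]; intro h'; exact absurd h'.symm hc
            simp only [hp]
            rw [if_neg (by simp)]
            rw [ih t _ (by simpa using h)]
            simp [List.count_cons, hc]

theorem rep_single (t : List Char) (a : Char) (new : List Char) :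
    PySem.Chars.replace t [a] new = t.flatMap (fun c => if c = a then new else [c]) := by
  simp [PySem.Chars.replace]
  rw [rep_go_single a new t.length t [] le_rfl]
  simp

theorem cnt_single (t : List Char) (a : Char) :
    PySem.Chars.count t [a] = t.count a := by
  simp [PySem.Chars.count]
  rw [count_go_single a t.length t 0 le_rfl]
  omega

-- A's replace chain when the last separator occurs at least twice: every ',' and '.' disappears.
theorem chainA_ge2 (t : List Char) (hbang : '!' ∉ t) (c : Char) (hc : c = ',' ∨ c = '.') :
    PySem.Chars.replace (PySem.Chars.replace (PySem.Chars.replace (PySem.Chars.replace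
        (PySem.Chars.replace t [c] []) ['!'] ['!']) [','] []) ['.'] []) ['!'] ['.']
      = t.filter (fun x => !(x == ',' || x == '.')) := by
  simp only [rep_single]
  induction t with
  | nil => simp
  | cons x xs ih =>
      have hx : x ≠ '!' := by intro h; exact hbang (by simp [h])
      have ih' := ih (fun h => hbang (List.mem_cons_of_mem _ h))
      simp only [List.flatMap_cons, List.flatMap_append, List.filter_cons]
      rw [ih']
      by_cases hxc : x = c
      · subst hxc; rcases hc with h | h <;> simp [h]
      · by_cases hcomma : x = ','
        · subst hcomma; simp [hxc]
        · by_cases hdot : x = '.'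
          · subst hdot; simp [hxc]
          · simp [hxc, hcomma, hdot, hx]

-- A's replace chain when the last separator occurs exactly once.
theorem chainA_eq1 (t : List Char) (hbang : '!' ∉ t) (c : Char) (hc : c = ',' ∨ c = '.') :
    PySem.Chars.replace (PySem.Chars.replace (PySem.Chars.replace
        (PySem.Chars.replace t [c] ['!']) [','] []) ['.'] []) ['!'] ['.']
      = t.flatMap (fun x => if x = c then ['.'] else if x = ',' ∨ x = '.' then [] else [x]) := by
  simp only [rep_single]
  induction t with
  | nil => simp
  | cons x xs ih =>
      have hx : x ≠ '!' := by intro h; exact hbang (by simp [h])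
      have ih' := ih (fun h => hbang (List.mem_cons_of_mem _ h))
      simp only [List.flatMap_cons, List.flatMap_append]
      rw [ih']
      by_cases hxc : x = c
      · subst hxc; rcases hc with h | h <;> simp [h]
      · by_cases hcomma : x = ','
        · subst hcomma; simp [hxc]
        · by_cases hdot : x = '.'
          · subst hdot; simp [hxc]
          · simp [hxc, hcomma, hdot, hx]

theorem flatMap_no_c (v : List Char) (c : Char) (hcv : c ∉ v) :
    v.flatMap (fun x => if x = c then ['.'] else if x = ',' ∨ x = '.' then [] else [x])
      = v.filter (fun x => !(x == ',' || x == '.')) := by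
  induction v with
  | nil => simp
  | cons x xs ih =>
      have hxc : x ≠ c := by intro h; exact hcv (by simp [h])
      have ih' := ih (fun h => hcv (List.mem_cons_of_mem _ h))
      simp only [List.flatMap_cons, List.filter_cons, ih', hxc]
      by_cases hs : x = ',' ∨ x = '.'
      · rcases hs with h | h <;> simp [h, hxc]
      · simp [hxc, hs]
        simp at hs
        simp [hs.1, hs.2]

theorem flatMap_clean (f : List Char) (c : Char) (hf : ∀ x ∈ f, x ≠ ',' ∧ x ≠ '.')
    (hc : c = ',' ∨ c = '.') :
    f.flatMap (fun x => if x = c then ['.'] else if x = ',' ∨ x = '.' then [] else [x]) = f := by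
  induction f with
  | nil => simp
  | cons x xs ih =>
      have hx := hf x (by simp)
      have hxc : x ≠ c := by rcases hc with h | h <;> subst h; exacts [hx.1, hx.2]
      simp only [List.flatMap_cons, ih (fun y hy => hf y (List.mem_cons_of_mem _ hy)), hxc]
      simp [hxc, hx.1, hx.2]

theorem filter_clean (f : List Char) (hf : ∀ x ∈ f, x ≠ ',' ∧ x ≠ '.') :
    f.filter (fun x => !(x == ',' || x == '.')) = f := by
  rw [List.filter_eq_self]
  intro x hx
  simp [(hf x hx).1, (hf x hx).2]

theorem filter_clean_cons (f : List Char) (c : Char) (hc : c = ',' ∨ c = '.')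
    (hclean : ∀ x ∈ f, x ≠ ',' ∧ x ≠ '.') :
    List.filter (fun x => !(x == ',' || x == '.')) (c :: f) = f := by
  rcases hc with h | h <;> subst h <;>
    · rw [List.filter_cons]
      simp only [show ∀ x : Char, (!(x == ',' || x == '.')) = true ↔ ¬(x = ',') ∧ ¬(x = '.')
        from by intro x; simp] at *
      simp [filter_clean]
      exact fun x hx => hclean x hx

-- the invariant of B's single forward pass
theorem foldB_spec (t : List Char) :
    ∃ w f l nc nd, t.foldl pvStepB ([], [], none, 0, 0) = (w, f, l, nc, nd)
      ∧ nc = (t.count ',' : Int) ∧ nd = (t.count '.' : Int)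
      ∧ ((l = none ∧ w = [] ∧ f = t ∧ ∀ x ∈ t, x ≠ ',' ∧ x ≠ '.')
         ∨ ∃ c v, l = some c ∧ (c = ',' ∨ c = '.') ∧ t = v ++ c :: f
              ∧ (∀ x ∈ f, x ≠ ',' ∧ x ≠ '.')
              ∧ w = v.filter (fun x => !(x == ',' || x == '.'))) := by
  induction t using List.reverseRecOn with
  | nil => exact ⟨[], [], none, 0, 0, rfl, by simp, by simp, Or.inl ⟨rfl, rfl, rfl, by simp⟩⟩
  | append_singleton u x ih =>
      obtain ⟨w, f, l, nc, nd, heq, hnc, hnd, hcase⟩ := ih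
      rw [List.foldl_append, heq]
      by_cases hx : x = ',' ∨ x = '.'
      · refine ⟨w ++ f, [], some x, nc + (if x = ',' then 1 else 0),
            nd + (if x = ',' then 0 else 1), by simp [pvStepB, hx], ?_, ?_, ?_⟩
        · rcases hx with h | h <;>
            simp [h, List.count_append, hnc, List.count_cons] <;> push_cast <;> ring
        · rcases hx with h | h <;>
            simp [h, List.count_append, hnd, List.count_cons] <;> push_cast <;> ring
        · refine Or.inr ⟨x, u, rfl, hx, by simp, by simp, ?_⟩
          rcases hcase with ⟨_, hw, hfu, hclean⟩ | ⟨c, v, hl, hc, hu, hclean, hw⟩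
          · rw [hw, hfu, filter_clean u hclean]; simp
          · rw [hw, hu, List.filter_append, filter_clean_cons f c hc hclean]
      · have hx1 : x ≠ ',' := fun h => hx (Or.inl h)
        have hx2 : x ≠ '.' := fun h => hx (Or.inr h)
        refine ⟨w, f ++ [x], l, nc, nd, by simp [pvStepB, hx], ?_, ?_, ?_⟩
        · simp [List.count_append, hnc, hx1]
        · simp [List.count_append, hnd, hx2]
        · rcases hcase with ⟨hl, hw, hfu, hclean⟩ | ⟨c, v, hl, hc, hu, hclean, hw⟩
          · refine Or.inl ⟨hl, hw, by rw [hfu], ?_⟩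
            intro y hy
            rcases List.mem_append.1 hy with h | h
            · exact hclean y h
            · simp at h; subst h; exact ⟨hx1, hx2⟩
          · refine Or.inr ⟨c, v, hl, hc, by rw [hu]; simp, ?_, hw⟩
            intro y hy
            rcases List.mem_append.1 hy with h | h
            · exact hclean y h
            · simp at h; subst h; exact ⟨hx1, hx2⟩
      
theorem findrev_some (v f : List Char) (c : Char) (p : Char → Bool)
    (hc : p c = true) (hf : ∀ x ∈ f, p x = false) :
    ((v ++ c :: f).reverse.find? p) = some c := by
  rw [List.reverse_append, List.reverse_cons, List.find?_append, List.find?_append]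
  have h1 : f.reverse.find? p = none := List.find?_eq_none.2 (by intro x hx; simp [hf x (List.mem_reverse.1 hx)])
  simp [h1, hc]

-- ===== VERDICT (by name: the statement is the Claim_ definition above) =====
theorem parse_decimal_spec : Claim_equal_parse_decimal := by
  intro s _
  unfold Spec_parse_decimal parse_decimal parse_decimal_alt
  by_cases hnil : PySem.Chars.strip s.toList = []
  · simp only [hnil, if_pos]
  · generalize hT : PySem.Chars.strip s.toList = t at hnil ⊢
    cases t with
    | nil => exact absurd rfl hnil
    | cons c0 rest =>
      simp only [List.headD_cons, List.drop_one, List.tail_cons]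
      by_cases hv : ("+-0123456789".toList.contains c0 &&
          rest.all (fun d => "0123456789,.".toList.contains d)) = true
      · simp only [hv, if_pos, if_neg hnil, if_true]
        have hbang : '!' ∉ (c0 :: rest) := by
          simp only [Bool.and_eq_true, List.all_eq_true] at hv
          intro hmem
          rcases List.mem_cons.1 hmem with h | h
          · have := hv.1; rw [← h] at this; simp at this
          · have := hv.2 _ h; simp at this
        obtain ⟨w, f, l, nc, nd, heq, hnc, hnd, hcase⟩ := foldB_spec (c0 :: rest)
        rw [heq]
        rcases hcase with ⟨hl, hw, hf, hclean⟩ | ⟨c, v, hl, hc, hu, hclean, hw⟩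
        · -- no separator at all
          have hfind : ((c0 :: rest).reverse.find? (fun ch => ",.".toList.contains ch)) = none := by
            apply List.find?_eq_none.2
            intro x hx
            have := hclean x (List.mem_reverse.1 hx)
            simp [this.1, this.2]
          rw [hfind]
          subst hl hw
          simp [← hf]
        · -- c is the last separator of t = v ++ c :: f
          have hfind : ((c0 :: rest).reverse.find? (fun ch => ",.".toList.contains ch)) = some c := by
            rw [hu]
            apply findrev_some
            · rcases hc with h | h <;> simp [h]
            · intro x hx; have := hclean x hx; simp [this.1, this.2]
          rw [hfind]
          subst hl
          simp only [Option.getD_some, reduceCtorEq, if_false, ne_eq, not_false_eq_true,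
            true_and, Option.some.injEq]
          have hcount : (c0 :: rest).count c = v.count c + 1 + f.count c := by
            rw [hu]; simp [List.count_append, List.count_cons]; ring
          have hsel : (if c = ',' then nc else nd) = ((c0 :: rest).count c : Int) := by
            rcases hc with h | h <;> simp [h, hnc, hnd]
          by_cases h2 : 2 ≤ (c0 :: rest).count c
          · -- separator occurs at least twice: drop every separator
            simp only [cnt_single]
            rw [if_pos h2]
            have hne1 : ¬ ((if c = ',' then nc else nd) = 1) := by
              rw [hsel]; intro h; omega
            rw [if_neg hne1]
            simp only []
            rw [chainA_ge2 _ hbang c hc]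
            have : (c0 :: rest).filter (fun x => !(x == ',' || x == '.')) = w ++ f := by
              rw [hu, hw, List.filter_append, filter_clean_cons f c hc hclean]
            rw [this]
          · -- separator occurs exactly once: it becomes the decimal point
            simp only [cnt_single]
            rw [if_neg h2]
            have hone : (c0 :: rest).count c = 1 := by
              have : c ∈ (c0 :: rest) := by rw [hu]; simp
              have := List.count_pos_iff.2 this
              omega
            have heq1 : (if c = ',' then nc else nd) = 1 := by rw [hsel, hone]; simp
            rw [if_pos heq1]
            simp only []
            rw [chainA_eq1 _ hbang c hc]
            have hcv : c ∉ v := by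
              intro hmem
              have := List.count_pos_iff.2 hmem
              omega
            have : (c0 :: rest).flatMap
                (fun x => if x = c then ['.'] else if x = ',' ∨ x = '.' then [] else [x])
                = w ++ '.' :: f := by
              rw [hu, List.flatMap_append, List.flatMap_cons]
              rw [flatMap_no_c v c hcv, flatMap_clean f c hclean hc, hw]
              simp
            rw [this]
      · simp only [Bool.not_eq_true] at hv
        simp only [hv, Bool.false_eq_true, if_false, if_neg hnil]
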